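-- pv_equiv track=rewrite | github.com/loning/the-phys | docs/psi-structum/book-1-collapse-ontology/part-01-recursive-collapse/verify_chapter_008.py | generate_valid_traces
-- ===== SOURCE A (Python) =====
-- def generate_valid_traces(max_length):
--     traces = [[]]  # 空迹
--     for length in range(1, max_length + 1):
--         new_traces = []
--         for trace in traces:
--             # 可以添加0
--             new_traces.append(trace + [0])
--             # 只有当最后一位不是1时才能添加1
--             if not trace or trace[-1] == 0:
--                 new_traces.append(trace + [1])
--         traces = new_traces
--     return traces
-- ===== SOURCE B (Python) =====
-- def generate_valid_traces(max_length):
--     def build(prefix):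
--         if len(prefix) >= max_length:
--             return [list(prefix)]
--         out = build(prefix + [0])
--         if not prefix or prefix[-1] == 0:
--             out += build(prefix + [1])
--         return out
--     return build([])
-- ===== Notes on version B (the rewrite author's own statement) =====
-- stated objective: alternative
-- what changed: Replaced A's level-by-level iterative rebuilding of the whole trace list with a recursive depth-first backtracking helper that extends a prefix and emits each complete trace on reaching full length, keeping the same branch order (zero branch first).
import Mathlib
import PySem

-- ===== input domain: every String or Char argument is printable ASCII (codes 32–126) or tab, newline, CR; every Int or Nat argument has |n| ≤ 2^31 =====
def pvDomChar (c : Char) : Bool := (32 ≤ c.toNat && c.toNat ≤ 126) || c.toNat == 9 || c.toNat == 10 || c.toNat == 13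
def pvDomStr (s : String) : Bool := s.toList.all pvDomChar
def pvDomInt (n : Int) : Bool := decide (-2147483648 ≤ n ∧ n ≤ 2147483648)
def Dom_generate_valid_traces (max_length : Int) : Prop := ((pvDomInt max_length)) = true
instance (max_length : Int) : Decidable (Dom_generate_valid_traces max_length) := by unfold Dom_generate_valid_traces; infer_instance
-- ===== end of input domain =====

-- B replaces A's level-by-level list rebuilding with a recursive depth-first backtracking helper (alternative decomposition; return value only).



-- ===== PORT A =====
-- A's inner loop body: for trace in traces: append trace+[0]; if not trace or trace[-1]==0: append trace+[1]
def gvtStep (traces : List (List Int)) : List (List Int) :=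
  traces.foldl (fun new_traces trace =>
    let new_traces := new_traces ++ [trace ++ [0]]
    if trace.isEmpty || (PySem.List.pyGet? trace (-1) == some (0:Int)) then
      new_traces ++ [trace ++ [1]]
    else new_traces) []

def generate_valid_traces (max_length : Int) : List (List Int) :=
  (PySem.List.pyRange 1 (max_length + 1) 1).foldl (fun traces _ => gvtStep traces) [[]]

-- ===== PORT B =====
-- B's recursive backtracking helper: build(pfx); recursion measured by remaining = max_length - len(pfx)
def gvtBuild (remaining : Nat) (pfx : List Int) : List (List Int) :=
  match remaining with
  | 0 => [pfx]
  | r + 1 =>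
    let out := gvtBuild r (pfx ++ [0])
    if pfx.isEmpty || (PySem.List.pyGet? pfx (-1) == some (0:Int)) then
      out ++ gvtBuild r (pfx ++ [1])
    else out

def generate_valid_traces_alt (max_length : Int) : List (List Int) :=
  gvtBuild max_length.toNat []

-- ===== PRECONDITION & SPEC =====
def Spec_generate_valid_traces (max_length : Int) (out : List (List Int)) : Prop := out = generate_valid_traces_alt max_length
instance (max_length : Int) (out : List (List Int)) : Decidable (Spec_generate_valid_traces max_length out) := by unfold Spec_generate_valid_traces; infer_instance

-- ===== CLAIM (what is proved, stated in full; the proofs are below) =====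
def Claim_equal_generate_valid_traces : Prop := ∀ (max_length : Int), Dom_generate_valid_traces max_length → Spec_generate_valid_traces max_length (generate_valid_traces max_length)

-- ===== LEMMAS AND PROOFS =====

def gvtChildren (t : List Int) : List (List Int) :=
  if t.isEmpty || (PySem.List.pyGet? t (-1) == some (0:Int)) then [t ++ [0], t ++ [1]] else [t ++ [0]]

theorem gvtStep_eq_flatMap (L : List (List Int)) : gvtStep L = L.flatMap gvtChildren := by
  have h : ∀ (acc : List (List Int)),
      L.foldl (fun new_traces trace =>
        let nt := new_traces ++ [trace ++ [0]]
        if trace.isEmpty || (PySem.List.pyGet? trace (-1) == some (0:Int)) then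
          nt ++ [trace ++ [1]] else nt) acc = acc ++ L.flatMap gvtChildren := by
    induction L with
    | nil => simp
    | cons t ts ih =>
      intro acc
      rw [List.foldl_cons, ih]
      simp only [gvtChildren, List.flatMap_cons]
      split_ifs with hc <;> simp
  have h0 := h []
  rw [List.nil_append] at h0
  exact h0

theorem gvtBuild_succ (r : Nat) (p : List Int) :
    gvtBuild (r + 1) p = (gvtChildren p).flatMap (gvtBuild r) := by
  simp only [gvtBuild, gvtChildren]
  split_ifs with hc <;> simp

theorem gvtIter (n : Nat) (L : List (List Int)) :
    gvtStep^[n] L = L.flatMap (gvtBuild n) := by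
  induction n generalizing L with
  | zero => simp [gvtBuild]
  | succ r ih =>
    rw [Function.iterate_succ_apply, ih, gvtStep_eq_flatMap, List.flatMap_assoc]
    congr 1; funext p; rw [gvtBuild_succ]

theorem foldl_const_iterate (l : List Int) (s : List (List Int)) :
    l.foldl (fun t _ => gvtStep t) s = gvtStep^[l.length] s := by
  induction l generalizing s with
  | nil => rfl
  | cons x xs ih => simp [List.foldl_cons, ih, Function.iterate_succ_apply]

-- ===== VERDICT (by name: the statement is the Claim_ definition above) =====
theorem generate_valid_traces_spec : Claim_equal_generate_valid_traces := by
  intro m _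
  unfold Spec_generate_valid_traces
  unfold generate_valid_traces generate_valid_traces_alt
  rw [foldl_const_iterate, PySem.List.length_pyRange_one, gvtIter]
  have h : (m + 1 - 1).toNat = m.toNat := by omega
  rw [h]
  simp
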